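-- pv_equiv track=rewrite | github.com/Stivy-01/HRM-behavioral | behavioral HRM/behavior/tokenizer.py | canonicalize_event
-- ===== SOURCE A (Python) =====
-- _CANON_MAP = {
--     "Side by side Contact, opposite way": "SIDE_BY_SIDE_CONTACT_OPPOSITE",
--     "Side by side Contact": "SIDE_BY_SIDE_CONTACT",
--     "Oral-genital Contact": "ORAL_GENITAL_CONTACT",
--     "Oral-oral Contact": "ORAL_ORAL_CONTACT",
--     "Approach rear": "APPROACH_REAR",
--     "Get away": "GET_AWAY",
--     "Social approach": "SOCIAL_APPROACH",
--     "Social escape": "SOCIAL_ESCAPE",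
--     "Break contact": "BREAK_CONTACT",
--     "Contact": "CONTACT",
--     "Move in contact": "MOVE_IN_CONTACT",
--     "Stop in contact": "STOP_IN_CONTACT",
--     "Move isolated": "MOVE_ISOLATED",
--     "Stop isolated": "STOP_ISOLATED",
--     "Rear in contact": "REAR_IN_CONTACT",
--     "Rearing": "REARING",
--     "SAP": "SAP",
--     "Huddling": "HUDDLING",
--     "Center_Zone": "CENTER_ZONE",
--     "Periphery_Zone": "PERIPHERY_ZONE",
-- }
--
-- def canonicalize_event(name: str) -> str:
--     if name in _CANON_MAP:
--         return _CANON_MAP[name]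
--     norm = []
--     for ch in name:
--         if ch.isalnum():
--             norm.append(ch.upper())
--         else:
--             norm.append("_")
--     tok = "".join(norm)
--     while "__" in tok:
--         tok = tok.replace("__", "_")
--     return tok.strip("_")
-- ===== SOURCE B (Python) =====
-- _CANON_MAP = {
--     "Side by side Contact, opposite way": "SIDE_BY_SIDE_CONTACT_OPPOSITE",
--     "Side by side Contact": "SIDE_BY_SIDE_CONTACT",
--     "Oral-genital Contact": "ORAL_GENITAL_CONTACT",
--     "Oral-oral Contact": "ORAL_ORAL_CONTACT",
--     "Approach rear": "APPROACH_REAR",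
--     "Get away": "GET_AWAY",
--     "Social approach": "SOCIAL_APPROACH",
--     "Social escape": "SOCIAL_ESCAPE",
--     "Break contact": "BREAK_CONTACT",
--     "Contact": "CONTACT",
--     "Move in contact": "MOVE_IN_CONTACT",
--     "Stop in contact": "STOP_IN_CONTACT",
--     "Move isolated": "MOVE_ISOLATED",
--     "Stop isolated": "STOP_ISOLATED",
--     "Rear in contact": "REAR_IN_CONTACT",
--     "Rearing": "REARING",
--     "SAP": "SAP",
--     "Huddling": "HUDDLING",
--     "Center_Zone": "CENTER_ZONE",
--     "Periphery_Zone": "PERIPHERY_ZONE",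
-- }
--
--
-- def canonicalize_event(name: str) -> str:
--     if name in _CANON_MAP:
--         return _CANON_MAP[name]
--     out = []
--     pending = False
--     for ch in name:
--         if ch.isalnum():
--             if pending and out:
--                 out.append("_")
--             out.append(ch.upper())
--             pending = False
--         else:
--             pending = True
--     return "".join(out)
-- ===== Notes on version B (the rewrite author's own statement) =====
-- stated objective: alternative
-- what changed: A repeatedly rescans and rewrites the whole token with replace('__','_') passes until a fixpoint and then strips underscores; B emits the result in one left-to-right scan that inserts a single separator between alphanumeric runs, so no collapse or strip pass is needed.
import Mathlib
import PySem

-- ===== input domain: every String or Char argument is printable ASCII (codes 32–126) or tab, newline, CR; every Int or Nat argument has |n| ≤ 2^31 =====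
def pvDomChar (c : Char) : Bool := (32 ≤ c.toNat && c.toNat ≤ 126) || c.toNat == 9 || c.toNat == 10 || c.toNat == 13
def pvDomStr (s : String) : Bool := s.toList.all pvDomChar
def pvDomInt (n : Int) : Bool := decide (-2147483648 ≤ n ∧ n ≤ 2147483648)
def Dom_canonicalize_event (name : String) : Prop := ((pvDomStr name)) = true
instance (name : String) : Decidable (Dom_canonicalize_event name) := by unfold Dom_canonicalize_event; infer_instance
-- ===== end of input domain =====

-- B replaces A's repeated full-string `replace("__","_")` passes and final strip by a single
-- left-to-right scan that inserts one separator between alphanumeric runs (objective: alternative one-pass algorithm).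

-- ===== PORT A =====
def pvCanonMap : PySem.Dict String String := PySem.Dict.ofList [
  ("Side by side Contact, opposite way", "SIDE_BY_SIDE_CONTACT_OPPOSITE"),
  ("Side by side Contact", "SIDE_BY_SIDE_CONTACT"),
  ("Oral-genital Contact", "ORAL_GENITAL_CONTACT"),
  ("Oral-oral Contact", "ORAL_ORAL_CONTACT"),
  ("Approach rear", "APPROACH_REAR"),
  ("Get away", "GET_AWAY"),
  ("Social approach", "SOCIAL_APPROACH"),
  ("Social escape", "SOCIAL_ESCAPE"),
  ("Break contact", "BREAK_CONTACT"),
  ("Contact", "CONTACT"),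
  ("Move in contact", "MOVE_IN_CONTACT"),
  ("Stop in contact", "STOP_IN_CONTACT"),
  ("Move isolated", "MOVE_ISOLATED"),
  ("Stop isolated", "STOP_ISOLATED"),
  ("Rear in contact", "REAR_IN_CONTACT"),
  ("Rearing", "REARING"),
  ("SAP", "SAP"),
  ("Huddling", "HUDDLING"),
  ("Center_Zone", "CENTER_ZONE"),
  ("Periphery_Zone", "PERIPHERY_ZONE")]

-- one left-to-right `replace("__","_")` pass, used only to justify termination of A's while loop
def pvSqueeze1 : List Char → List Char
  | [] => []
  | [c] => [c]
  | a :: b :: t => if a = '_' ∧ b = '_' then '_' :: pvSqueeze1 t else a :: pvSqueeze1 (b :: t)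

theorem pvSq1_uu (t : List Char) : pvSqueeze1 ('_' :: '_' :: t) = '_' :: pvSqueeze1 t := by
  simp [pvSqueeze1]

theorem pvSq1_cons (a b : Char) (t : List Char) (h : ¬(a = '_' ∧ b = '_')) :
    pvSqueeze1 (a :: b :: t) = a :: pvSqueeze1 (b :: t) := by
  simp [pvSqueeze1, h]

theorem pvReplace_go_eq (fuel : Nat) : ∀ (l acc : List Char), l.length ≤ fuel →
    PySem.Chars.replace.go ['_','_'] ['_'] fuel l acc = acc.reverse ++ pvSqueeze1 l := by
  induction fuel with
  | zero =>
    intro l acc h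
    have hl : l = [] := by cases l <;> simp_all
    subst hl
    simp [PySem.Chars.replace.go, pvSqueeze1]
  | succ f ih =>
    intro l acc h
    cases l with
    | nil => simp [PySem.Chars.replace.go, pvSqueeze1]
    | cons c t =>
      cases t with
      | nil =>
        have hp : (['_','_'] : List Char).isPrefixOf [c] = false := by
          simp [List.isPrefixOf]
        simp only [PySem.Chars.replace.go, hp, Bool.false_eq_true, if_false]
        rw [ih [] (c :: acc) (by simp)]
        simp [pvSqueeze1]
      | cons b t' =>
        by_cases hcb : c = '_' ∧ b = '_'
        · obtain ⟨hc, hb⟩ := hcb; subst hc; subst hb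
          have hp : (['_','_'] : List Char).isPrefixOf ('_' :: '_' :: t') = true := by
            simp [List.isPrefixOf]
          simp only [PySem.Chars.replace.go, hp, if_true]
          rw [show List.drop (['_','_'] : List Char).length ('_' :: '_' :: t') = t' from rfl]
          rw [ih t' ((['_'] : List Char).reverse ++ acc) (by simp at h ⊢; omega)]
          rw [pvSq1_uu]
          simp
        · have hp : (['_','_'] : List Char).isPrefixOf (c :: b :: t') = false := by
            simp only [List.isPrefixOf, List.isPrefixOf_nil_left, Bool.and_true,
              Bool.and_eq_false_iff, beq_eq_false_iff_ne, ne_eq]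
            by_cases hc : c = '_'
            · right; intro hb; exact hcb ⟨hc, hb.symm⟩
            · left; intro hc'; exact hc hc'.symm
          simp only [PySem.Chars.replace.go, hp, Bool.false_eq_true, if_false]
          rw [ih (b :: t') (c :: acc) (by simp at h ⊢; omega)]
          rw [pvSq1_cons c b t' hcb]
          simp

theorem pvSqueeze1_eq (s : List Char) :
    PySem.Chars.replace s ['_','_'] ['_'] = pvSqueeze1 s := by
  have h := pvReplace_go_eq s.length s [] le_rfl
  simpa [PySem.Chars.replace] using h

theorem pvSqueeze1_len (s : List Char) : (pvSqueeze1 s).length ≤ s.length := by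
  induction s using pvSqueeze1.induct with
  | case1 => simp [pvSqueeze1]
  | case2 c => simp [pvSqueeze1]
  | case3 a b t hab ih =>
    obtain ⟨ha, hb⟩ := hab; subst ha; subst hb
    rw [pvSq1_uu]
    simp only [List.length_cons]
    omega
  | case4 a b t hab ih =>
    rw [pvSq1_cons a b t hab]
    simp only [List.length_cons] at ih ⊢
    omega

theorem pvSqueeze1_len_lt (s : List Char) (h : ['_','_'] <:+: s) :
    (pvSqueeze1 s).length < s.length := by
  induction s using pvSqueeze1.induct with
  | case1 => exact absurd h.length_le (by simp)
  | case2 c => exact absurd h.length_le (by simp)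
  | case3 a b t hab ih =>
    obtain ⟨ha, hb⟩ := hab; subst ha; subst hb
    rw [pvSq1_uu]
    have := pvSqueeze1_len t
    simp only [List.length_cons]
    omega
  | case4 a b t hab ih =>
    have h' : ['_','_'] <:+: (b :: t) := by
      obtain ⟨pre, post, hp⟩ := h
      cases pre with
      | nil =>
        simp only [List.nil_append, List.cons_append] at hp
        injection hp with h1 h2
        injection h2 with h3 h4
        exact absurd ⟨h1.symm, h3.symm⟩ hab
      | cons x pre' =>
        injection hp with h1 h2
        exact ⟨pre', post, h2⟩
    rw [pvSq1_cons a b t hab]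
    have := ih h'
    simp only [List.length_cons] at this ⊢
    omega

def pvCanonWhile (tok : List Char) : List Char :=
  if h : PySem.Chars.isIn ['_','_'] tok = true then
    pvCanonWhile (PySem.Chars.replace tok ['_','_'] ['_'])
  else tok
termination_by tok.length
decreasing_by
  rw [pvSqueeze1_eq]
  exact pvSqueeze1_len_lt _ ((PySem.Chars.isIn_iff_infix _ _).1 h)

def canonicalize_event (name : String) : String :=
  match pvCanonMap.get? name with
  | some v => v
  | none =>
    let norm : List Char := name.toList.foldl
      (fun acc ch => acc ++ [if PySem.Chars.isalnum ch then PySem.Chars.upperChar ch else '_']) []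
    String.mk (PySem.Chars.stripChars (pvCanonWhile norm) ['_'])

-- ===== PORT B =====
def pvAltGo : List Char → List Char → Bool → List Char
  | [], out, _ => out
  | ch :: t, out, pending =>
    if PySem.Chars.isalnum ch then
      pvAltGo t ((if pending && !out.isEmpty then out ++ ['_'] else out) ++ [PySem.Chars.upperChar ch]) false
    else
      pvAltGo t out true

def canonicalize_event_alt (name : String) : String :=
  match pvCanonMap.get? name with
  | some v => v
  | none => String.mk (pvAltGo name.toList [] false)

-- ===== PRECONDITION & SPEC =====
def Spec_canonicalize_event (name : String) (out : String) : Prop := out = canonicalize_event_alt name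
instance (name : String) (out : String) : Decidable (Spec_canonicalize_event name out) := by unfold Spec_canonicalize_event; infer_instance

-- ===== CLAIM (what is proved, stated in full; the proofs are below) =====
def Claim_equal_canonicalize_event : Prop := ∀ (name : String), Dom_canonicalize_event name → Spec_canonicalize_event name (canonicalize_event name)

-- ===== LEMMAS AND PROOFS =====
def pvF (ch : Char) : Char := if PySem.Chars.isalnum ch then PySem.Chars.upperChar ch else '_'
def pvU (c : Char) : Bool := c == '_'
def pvL (s : List Char) : List Char := s.dropWhile pvU
def pvR (s : List Char) : List Char := (s.reverse.dropWhile pvU).reverse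

-- full collapse of underscore runs (the fixpoint of A's while loop)
def pvSqueeze : List Char → List Char
  | [] => []
  | [c] => [c]
  | a :: b :: t => if a = '_' ∧ b = '_' then pvSqueeze (b :: t) else a :: pvSqueeze (b :: t)

theorem pvUpper_ne (c : Char) (h : PySem.Chars.isalnum c = true) : PySem.Chars.upperChar c ≠ '_' := by
  have hA : ∀ a b : Char, (a ≤ b) ↔ a.toNat ≤ b.toNat := fun a b => by
    rw [Char.le_def, UInt32.le_iff_toNat_le]; rfl
  have hne : ∀ d : Char, d.toNat ≠ 95 → d ≠ '_' := by
    intro d hd he; exact hd (by rw [he]; rfl)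
  have e1 : 'A'.toNat = 65 := rfl
  have e2 : 'Z'.toNat = 90 := rfl
  have e3 : 'a'.toNat = 97 := rfl
  have e4 : 'z'.toNat = 122 := rfl
  have e5 : '0'.toNat = 48 := rfl
  have e6 : '9'.toNat = 57 := rfl
  simp only [PySem.Chars.isalnum, PySem.Chars.isalpha, PySem.Chars.isdigit, PySem.Chars.isupper,
    PySem.Chars.islower, Bool.or_eq_true, Bool.and_eq_true, decide_eq_true_eq, hA,
    e1, e2, e3, e4, e5, e6] at h
  unfold PySem.Chars.upperChar
  by_cases hl : PySem.Chars.islower c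
  · rw [hl, if_pos rfl]
    have hb : 97 ≤ c.toNat ∧ c.toNat ≤ 122 := by
      simp only [PySem.Chars.islower, Bool.and_eq_true, decide_eq_true_eq, hA, e3, e4] at hl
      exact hl
    have hv : (c.toNat - 32).isValidChar := Or.inl (by omega)
    apply hne
    rw [Char.toNat_ofNat, if_pos hv]
    omega
  · have hb : ¬ (97 ≤ c.toNat ∧ c.toNat ≤ 122) := by
      simp only [PySem.Chars.islower, Bool.and_eq_true, decide_eq_true_eq, hA, e3, e4,
        Bool.not_eq_true] at hl
      exact hl
    simp only [Bool.not_eq_true] at hl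
    rw [hl, if_neg (by simp)]
    apply hne
    omega

theorem pvR_cons (a : Char) (x : List Char) :
    pvR (a :: x) = if pvR x = [] then (if pvU a then [] else [a]) else a :: pvR x := by
  unfold pvR
  rw [List.reverse_cons, List.dropWhile_append]
  by_cases h : (List.dropWhile pvU x.reverse).isEmpty
  · rw [if_pos h]
    rw [List.isEmpty_iff] at h
    rw [if_pos (by rw [h]; rfl)]
    by_cases ha : pvU a
    · simp [List.dropWhile_cons, ha]
    · simp [List.dropWhile_cons, ha]
  · rw [if_neg h]
    rw [Bool.not_eq_true, List.isEmpty_eq_false_iff] at h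
    rw [if_neg (by simpa using h)]
    simp

theorem pvR_cons_ne (a : Char) (x : List Char) (h : pvU a = false) : pvR (a :: x) = a :: pvR x := by
  rw [pvR_cons, h]
  split
  · rename_i h'; rw [h']; rfl
  · rfl

theorem pvL_cons_u (x : List Char) : pvL ('_' :: x) = pvL x := by
  simp [pvL, pvU, List.dropWhile_cons]

theorem pvL_cons_ne (a : Char) (x : List Char) (h : pvU a = false) : pvL (a :: x) = a :: x := by
  simp [pvL, List.dropWhile_cons, h]

theorem pvT (x : List Char) : pvL (pvR ('_' :: x)) = pvL (pvR x) := by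
  rw [pvR_cons]
  split
  · rename_i h; rw [h]; rfl
  · exact pvL_cons_u _

theorem pvComm (s : List Char) : pvR (pvL s) = pvL (pvR s) := by
  induction s with
  | nil => rfl
  | cons c t ih =>
    by_cases hc : pvU c
    · have hc' : c = '_' := by simpa [pvU] using hc
      subst hc'
      rw [pvL_cons_u, ih, pvT]
    · have hc' : pvU c = false := eq_false_of_ne_true hc
      rw [pvL_cons_ne c t hc', pvR_cons]
      by_cases h : pvR t = []
      · rw [if_pos h, if_neg (by simp [hc']), pvL_cons_ne _ _ hc']
      · rw [if_neg h, pvL_cons_ne _ _ hc']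

theorem pvSqueeze_uu (t : List Char) : pvSqueeze ('_' :: '_' :: t) = pvSqueeze ('_' :: t) := by
  simp [pvSqueeze]

theorem pvSqueeze_cons (a b : Char) (t : List Char) (h : ¬(a = '_' ∧ b = '_')) :
    pvSqueeze (a :: b :: t) = a :: pvSqueeze (b :: t) := by
  simp [pvSqueeze, h]

theorem pvSqueeze_cons_ne (a : Char) (x : List Char) (h : a ≠ '_') :
    pvSqueeze (a :: x) = a :: pvSqueeze x := by
  cases x with
  | nil => rfl
  | cons b t => exact pvSqueeze_cons a b t (by tauto)

theorem pvNoInfix (s : List Char) (h : ¬ ['_','_'] <:+: s) : pvSqueeze s = s := by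
  induction s using pvSqueeze.induct with
  | case1 => rfl
  | case2 c => rfl
  | case3 a b t hab ih =>
    exact absurd ⟨[], t, by rw [hab.1, hab.2]; rfl⟩ h
  | case4 a b t hab ih =>
    rw [pvSqueeze_cons a b t hab, ih (fun hi => h (List.infix_cons hi))]

theorem pvPQ (s : List Char) :
    pvSqueeze (pvSqueeze1 s) = pvSqueeze s ∧
    pvSqueeze ('_' :: pvSqueeze1 s) = pvSqueeze ('_' :: s) := by
  induction s using pvSqueeze1.induct with
  | case1 => exact ⟨rfl, rfl⟩
  | case2 c => exact ⟨rfl, rfl⟩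
  | case3 a b t hab ih =>
    obtain ⟨ha, hb⟩ := hab; subst ha; subst hb
    constructor
    · rw [pvSq1_uu, ih.2, ← pvSqueeze_uu]
    · rw [pvSq1_uu, pvSqueeze_uu, ih.2, pvSqueeze_uu, pvSqueeze_uu]
  | case4 a b t hab ih =>
    by_cases ha : a = '_'
    · subst ha
      constructor
      · rw [pvSq1_cons _ _ _ hab, ih.2]
      · rw [pvSq1_cons _ _ _ hab, pvSqueeze_uu, ih.2, pvSqueeze_uu]
    · constructor
      · rw [pvSq1_cons _ _ _ hab, pvSqueeze_cons_ne a _ ha, ih.1, ← pvSqueeze_cons a b t hab]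
      · rw [pvSq1_cons _ _ _ hab, pvSqueeze_cons '_' a _ (fun hx => ha hx.2),
          pvSqueeze_cons_ne a _ ha, ih.1, pvSqueeze_cons '_' a _ (fun hx => ha hx.2),
          pvSqueeze_cons a b t hab]

theorem pvWhile_eq (tok : List Char) : pvCanonWhile tok = pvSqueeze tok := by
  induction tok using pvCanonWhile.induct with
  | case1 tok h ih =>
    rw [pvCanonWhile, dif_pos h, ih, pvSqueeze1_eq, (pvPQ tok).1]
  | case2 tok h =>
    rw [pvCanonWhile, dif_neg h,
      pvNoInfix tok ((PySem.Chars.isIn_eq_false_iff _ _).1 (by simpa using h))]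

theorem pvG (t : List Char) : ∀ out : List Char, out ≠ [] →
    pvAltGo t out false = out ++ pvR (pvSqueeze (t.map pvF)) ∧
    pvAltGo t out true = out ++ pvR (pvSqueeze ('_' :: t.map pvF)) := by
  induction t with
  | nil =>
    intro out hout
    constructor
    · show out = out ++ pvR (pvSqueeze [])
      simp [pvSqueeze, pvR]
    · show out = out ++ pvR (pvSqueeze ['_'])
      rw [show pvSqueeze ['_'] = ['_'] from rfl, show pvR ['_'] = [] from rfl, List.append_nil]
  | cons ch t ih =>
    intro out hout
    by_cases ha : PySem.Chars.isalnum ch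
    · have hm' : PySem.Chars.upperChar ch ≠ '_' := pvUpper_ne ch ha
      have hm : pvU (PySem.Chars.upperChar ch) = false := by
        simp [pvU, beq_eq_false_iff_ne, hm']
      have hmap : (ch :: t).map pvF = PySem.Chars.upperChar ch :: t.map pvF := by
        simp [pvF, ha]
      constructor
      · rw [show pvAltGo (ch :: t) out false
            = pvAltGo t (out ++ [PySem.Chars.upperChar ch]) false by
          simp [pvAltGo, ha]]
        rw [(ih (out ++ [PySem.Chars.upperChar ch]) (by simp)).1]
        rw [hmap, pvSqueeze_cons_ne _ _ hm', pvR_cons_ne _ _ hm]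
        simp
      · rw [show pvAltGo (ch :: t) out true
            = pvAltGo t ((out ++ ['_']) ++ [PySem.Chars.upperChar ch]) false by
          simp [pvAltGo, ha, List.isEmpty_eq_false_iff.mpr hout]]
        rw [(ih ((out ++ ['_']) ++ [PySem.Chars.upperChar ch]) (by simp)).1]
        rw [hmap, pvSqueeze_cons '_' _ _ (fun hx => hm' hx.2), pvSqueeze_cons_ne _ _ hm',
          pvR_cons '_', pvR_cons_ne _ _ hm, if_neg (by simp)]
        simp
    · have hmap : (ch :: t).map pvF = '_' :: t.map pvF := by
        simp [pvF, ha]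
      have hstep : ∀ p : Bool, pvAltGo (ch :: t) out p = pvAltGo t out true := by
        intro p; simp [pvAltGo, ha]
      constructor
      · rw [hstep false, (ih out hout).2, hmap]
      · rw [hstep true, (ih out hout).2, hmap, pvSqueeze_uu]

theorem pvS' (x : List Char) :
    pvL (pvR (pvSqueeze ('_' :: x))) = pvL (pvR (pvSqueeze x)) := by
  cases x with
  | nil => rfl
  | cons c x' =>
    by_cases hc : c = '_'
    · subst hc; rw [pvSqueeze_uu]
    · rw [pvSqueeze_cons _ _ _ (by tauto), pvT]

theorem pvG3 (t : List Char) : ∀ pending : Bool,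
    pvAltGo t [] pending = pvL (pvR (pvSqueeze (t.map pvF))) := by
  induction t with
  | nil => intro p; rfl
  | cons ch t ih =>
    intro p
    by_cases ha : PySem.Chars.isalnum ch
    · have hm' : PySem.Chars.upperChar ch ≠ '_' := pvUpper_ne ch ha
      have hm : pvU (PySem.Chars.upperChar ch) = false := by
        simp [pvU, beq_eq_false_iff_ne, hm']
      rw [show pvAltGo (ch :: t) [] p = pvAltGo t [PySem.Chars.upperChar ch] false by
        simp [pvAltGo, ha]]
      rw [(pvG t [PySem.Chars.upperChar ch] (by simp)).1]
      rw [show (ch :: t).map pvF = PySem.Chars.upperChar ch :: t.map pvF by simp [pvF, ha]]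
      rw [pvSqueeze_cons_ne _ _ hm', pvR_cons_ne _ _ hm, pvL_cons_ne _ _ hm]
      simp
    · rw [show pvAltGo (ch :: t) [] p = pvAltGo t [] true by simp [pvAltGo, ha]]
      rw [ih true, show (ch :: t).map pvF = '_' :: t.map pvF by simp [pvF, ha], pvS']

theorem pvStrip_eq (s : List Char) : PySem.Chars.stripChars s ['_'] = pvR (pvL s) := by
  have hp : (fun c => (['_'] : List Char).contains c) = pvU := by
    funext c; simp [pvU, ← Bool.beq_eq_decide_eq]
  simp only [PySem.Chars.stripChars, hp, pvR, pvL]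

-- ===== VERDICT (by name: the statement is the Claim_ definition above) =====
theorem canonicalize_event_spec : Claim_equal_canonicalize_event := by
  intro name _
  unfold Spec_canonicalize_event canonicalize_event canonicalize_event_alt
  cases h : pvCanonMap.get? name with
  | some v => rfl
  | none =>
    simp only
    rw [PySem.List.foldl_append_singleton_eq_map (fun ch => if PySem.Chars.isalnum ch then PySem.Chars.upperChar ch else '_') name.toList []]
    rw [List.nil_append, pvWhile_eq, pvStrip_eq, pvComm]
    rw [show (fun ch => if PySem.Chars.isalnum ch then PySem.Chars.upperChar ch else '_') = pvF from rfl]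
    rw [← pvG3 name.toList false]
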